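-- pv_equiv track=rewrite | github.com/VictorCabello/adventofcode2023 | day_02/main.py | isGameValid
-- ===== SOURCE A (Python) =====
-- def isColorValid(colorCount, maxAllowed):
--     """
--     >>> isColorValid(3, 14)
--     True
--     """
--     return colorCount <= maxAllowed
--
-- def isGameValid(game):
--     """
--     >>> isGameValid({'id': '1', 'setList': [{'blue': 3, 'red': 4}, {'red': 1, 'green': 2, 'blue': 6}, {'green': 2}]})
--     True
--     """
--     setList = game['setList']
--     redAllowed = 12
--     blueAllowed = 14
--     greenAllowed = 13
--     isValid = True
--     for mySet in setList:
--         if 'red' in mySet.keys():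
--             isValid = isValid and isColorValid(mySet['red'], redAllowed)
--         if 'blue' in mySet.keys():
--             isValid = isValid and isColorValid(mySet['blue'], blueAllowed)
--         if 'green' in mySet.keys():
--             isValid = isValid and isColorValid(mySet['green'], greenAllowed)
--
--     return isValid
-- ===== SOURCE B (Python) =====
-- def isGameValid(game):
--     setList = game['setList']
--     def maxCount(color):
--         return max((s[color] for s in setList if color in s), default=0)
--     return maxCount('red') <= 12 and maxCount('blue') <= 14 and maxCount('green') <= 13
-- ===== Notes on version B (the rewrite author's own statement) =====
-- stated objective: alternative
-- what changed: Instead of one pass with a running boolean accumulator checking every present color in every set, B aggregates first: it computes the maximum count ever drawn per color across all sets (three staged passes) and then compares the three maxima against the limits once.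
import Mathlib
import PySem

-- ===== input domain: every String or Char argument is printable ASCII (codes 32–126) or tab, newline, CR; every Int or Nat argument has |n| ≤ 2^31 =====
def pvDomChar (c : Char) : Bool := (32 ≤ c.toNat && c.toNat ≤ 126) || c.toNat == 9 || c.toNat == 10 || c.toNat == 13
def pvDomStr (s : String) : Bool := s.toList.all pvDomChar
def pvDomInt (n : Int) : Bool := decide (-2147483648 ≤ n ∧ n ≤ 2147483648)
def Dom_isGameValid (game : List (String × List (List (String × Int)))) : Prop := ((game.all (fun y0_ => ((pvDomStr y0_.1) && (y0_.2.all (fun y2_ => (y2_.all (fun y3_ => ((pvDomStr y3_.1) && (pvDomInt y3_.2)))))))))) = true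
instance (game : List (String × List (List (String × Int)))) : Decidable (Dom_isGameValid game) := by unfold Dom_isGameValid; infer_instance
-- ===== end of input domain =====

-- B aggregates first (maximum count per color over all sets, three staged passes) and then
-- compares the three maxima against the limits once, instead of A's single pass with a
-- running boolean accumulator (alternative decomposition; same cost).

-- first-match association-list lookup = Python dict d[k] / 'k in d' (exact)
def dictGet? {α : Type} (d : List (String × α)) (k : String) : Option α :=
  (d.find? (fun p => p.1 == k)).map (·.2)

-- ===== PORT A =====
def isColorValid (colorCount maxAllowed : Int) : Bool := colorCount ≤ maxAllowed

def isGameValid (game : List (String × List (List (String × Int)))) : Bool :=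
  let setList := (dictGet? game "setList").getD []   -- KeyError if "setList" missing; excluded by Pre_
  setList.foldl (fun isValid mySet =>
    let v1 := if (dictGet? mySet "red").isSome then
        isValid && isColorValid ((dictGet? mySet "red").getD 0) 12 else isValid
    let v2 := if (dictGet? mySet "blue").isSome then
        v1 && isColorValid ((dictGet? mySet "blue").getD 0) 14 else v1
    if (dictGet? mySet "green").isSome then
        v2 && isColorValid ((dictGet? mySet "green").getD 0) 13 else v2) true

-- ===== PORT B =====
-- max((s[color] for s in setList if color in s), default=0)
def maxCount (setList : List (List (String × Int))) (color : String) : Int :=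
  (PySem.List.max? (setList.filterMap (fun s => dictGet? s color)) (fun x => x)).getD 0

def isGameValid_alt (game : List (String × List (List (String × Int)))) : Bool :=
  let setList := (dictGet? game "setList").getD []
  decide (maxCount setList "red" ≤ 12) && decide (maxCount setList "blue" ≤ 14)
    && decide (maxCount setList "green" ≤ 13)

-- ===== PRECONDITION & SPEC =====
-- Pre_ requires the "setList" key: without it A (and B) raise KeyError.
def Pre_isGameValid (game : List (String × List (List (String × Int)))) : Prop :=
  "setList" ∈ game.map Prod.fst
instance (game : List (String × List (List (String × Int)))) : Decidable (Pre_isGameValid game) := by unfold Pre_isGameValid; infer_instance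

def pvWitness_isGameValid : (List (String × List (List (String × Int)))) :=
  [("id", []), ("setList", [[("blue", 3), ("red", 4)], [("red", 1), ("green", 2), ("blue", 6)], [("green", 2)]])]

def Spec_isGameValid (game : List (String × List (List (String × Int)))) (out : Bool) : Prop := out = isGameValid_alt game
instance (game : List (String × List (List (String × Int)))) (out : Bool) : Decidable (Spec_isGameValid game out) := by unfold Spec_isGameValid; infer_instance

-- ===== CLAIM =====
def Claim_equal_isGameValid : Prop := ∀ (game : List (String × List (List (String × Int)))), Dom_isGameValid game → Pre_isGameValid game → Spec_isGameValid game (isGameValid game)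

-- ===== LEMMAS AND PROOFS =====

-- single-color check as A performs it (first-match lookup, skip if absent)
def chk (s : List (String × Int)) (c : String) (m : Int) : Bool :=
  match dictGet? s c with
  | some v => decide (v ≤ m)
  | none => true

-- A's per-set step equals acc && the three checks
lemma step_eq (acc : Bool) (s : List (String × Int)) :
    (let v1 := if (dictGet? s "red").isSome then
        acc && isColorValid ((dictGet? s "red").getD 0) 12 else acc
     let v2 := if (dictGet? s "blue").isSome then
        v1 && isColorValid ((dictGet? s "blue").getD 0) 14 else v1
     if (dictGet? s "green").isSome then
        v2 && isColorValid ((dictGet? s "green").getD 0) 13 else v2)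
    = (acc && (chk s "red" 12 && chk s "blue" 14 && chk s "green" 13)) := by
  rcases hr : dictGet? s "red" with _ | vr <;>
  rcases hb : dictGet? s "blue" with _ | vb <;>
  rcases hg : dictGet? s "green" with _ | vg <;>
  simp [chk, hr, hb, hg, isColorValid, Bool.and_assoc] <;> rfl

lemma foldl_and_all (l : List (List (String × Int))) (f : List (String × Int) → Bool) (acc : Bool) :
    l.foldl (fun a s => a && f s) acc = (acc && l.all f) := by
  induction l generalizing acc with
  | nil => simp
  | cons hd tl ih => simp [List.all_cons, ih, Bool.and_assoc]

-- maximum-with-default-0 ≤ m (0 ≤ m) iff every element is ≤ m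
lemma maxD_le (l : List Int) (m : Int) (hm : 0 ≤ m) :
    ((PySem.List.max? l (fun x => x)).getD 0 ≤ m) ↔ ∀ x ∈ l, x ≤ m := by
  rcases h : PySem.List.max? l (fun x => x) with _ | M
  · have : l = [] := (PySem.List.max?_eq_none_iff l _).mp h
    subst this; simp [hm]
  · simp only [Option.getD_some]
    constructor
    · intro hMm x hx
      exact le_trans (PySem.List.max?_isMax h x hx) hMm
    · intro hall
      exact hall M (PySem.List.max?_mem h)

-- B's per-color maximum test equals A's per-set check, scanned over all sets
lemma maxCount_le (sl : List (List (String × Int))) (c : String) (m : Int) (hm : 0 ≤ m) :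
    decide (maxCount sl c ≤ m) = sl.all (fun s => chk s c m) := by
  unfold maxCount
  rw [Bool.eq_iff_iff, decide_eq_true_iff, maxD_le _ _ hm, List.all_eq_true]
  constructor
  · intro h s hs
    unfold chk
    rcases hg : dictGet? s c with _ | v
    · rfl
    · exact decide_eq_true (h v (List.mem_filterMap.mpr ⟨s, hs, hg⟩))
  · intro h x hx
    obtain ⟨s, hs, hg⟩ := List.mem_filterMap.mp hx
    have := h s hs
    unfold chk at this
    rw [hg] at this
    exact of_decide_eq_true this

lemma all_and (l : List (List (String × Int))) (f g : List (String × Int) → Bool) :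
    l.all (fun s => f s && g s) = (l.all f && l.all g) := by
  induction l with
  | nil => rfl
  | cons hd tl ih =>
    simp only [List.all_cons, ih]
    cases f hd <;> cases g hd <;> cases tl.all f <;> cases tl.all g <;> rfl

-- ===== VERDICT =====
theorem isGameValid_spec : Claim_equal_isGameValid := by
  intro game _ _
  unfold Spec_isGameValid isGameValid isGameValid_alt
  set sl := (dictGet? game "setList").getD [] with hsl
  have hA : sl.foldl (fun isValid mySet =>
      let v1 := if (dictGet? mySet "red").isSome then
          isValid && isColorValid ((dictGet? mySet "red").getD 0) 12 else isValid
      let v2 := if (dictGet? mySet "blue").isSome then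
          v1 && isColorValid ((dictGet? mySet "blue").getD 0) 14 else v1
      if (dictGet? mySet "green").isSome then
          v2 && isColorValid ((dictGet? mySet "green").getD 0) 13 else v2) true
      = sl.all (fun s => chk s "red" 12 && chk s "blue" 14 && chk s "green" 13) := by
    have : sl.foldl (fun isValid mySet =>
        let v1 := if (dictGet? mySet "red").isSome then
            isValid && isColorValid ((dictGet? mySet "red").getD 0) 12 else isValid
        let v2 := if (dictGet? mySet "blue").isSome then
            v1 && isColorValid ((dictGet? mySet "blue").getD 0) 14 else v1
        if (dictGet? mySet "green").isSome then
            v2 && isColorValid ((dictGet? mySet "green").getD 0) 13 else v2) true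
        = sl.foldl (fun a s => a && (chk s "red" 12 && chk s "blue" 14 && chk s "green" 13)) true := by
      apply PySem.List.foldl_congr_mem
      intro acc s _
      exact step_eq acc s
    rw [this, foldl_and_all, Bool.true_and]
  show _ = (decide (maxCount sl "red" ≤ 12) && decide (maxCount sl "blue" ≤ 14)
      && decide (maxCount sl "green" ≤ 13))
  rw [hA, all_and, all_and,
      maxCount_le sl "red" 12 (by norm_num),
      maxCount_le sl "blue" 14 (by norm_num),
      maxCount_le sl "green" 13 (by norm_num)]
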